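-- pv_equiv track=rewrite | github.com/Candouber/Astudio | server/services/skill_import.py | _extract_skill_md_summary
-- ===== SOURCE A (Python) =====
-- def _extract_skill_md_meta(skill_md: str) -> dict[str, str]:
--     """从 SKILL.md 的 YAML frontmatter 抽 name / description / version。"""
--     out: dict[str, str] = {}
--     if not skill_md:
--         return out
--     lines = skill_md.splitlines()
--     if not (lines and lines[0].strip() == "---"):
--         return out
--     for line in lines[1:]:
--         if line.strip() == "---":
--             break
--         if ":" in line:
--             k, v = line.split(":", 1)
--             k = k.strip().lower()
--             if k in ("name", "description", "version"):
--                 out[k] = v.strip().strip('"').strip("'")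
--     return out
--
-- def _extract_skill_md_summary(skill_md: str) -> str:
--     """SKILL.md 描述优先用 frontmatter.description，否则第一段正文。"""
--     meta = _extract_skill_md_meta(skill_md)
--     if meta.get("description"):
--         return meta["description"][:200]
--     for line in skill_md.splitlines():
--         s = line.strip()
--         if s and not s.startswith("#") and s != "---":
--             return s[:200]
--     return ""
-- ===== SOURCE B (Python) =====
-- def _extract_skill_md_summary(skill_md: str) -> str:
--     # single pass with a state machine: frontmatter flag + last description + first body line
--     in_fm = False
--     desc = None
--     body = None
--     for i, line in enumerate(skill_md.splitlines()):
--         s = line.strip()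
--         if i == 0:
--             in_fm = (s == "---")
--         elif in_fm:
--             if s == "---":
--                 in_fm = False
--             elif ":" in line:
--                 k, v = line.split(":", 1)
--                 if k.strip().lower() == "description":
--                     desc = v.strip().strip('"').strip("'")
--         if body is None and s and not s.startswith("#") and s != "---":
--             body = s
--     if desc:
--         return desc[:200]
--     return (body or "")[:200]
-- ===== Notes on version B (the rewrite author's own statement) =====
-- stated objective: alternative
-- what changed: B replaces A's staged design (build a name/description/version dict over the frontmatter, read it back, then a second full scan for the first body line) with one single pass over the enumerated lines driving a state machine (in-frontmatter flag, last description seen, first body line seen), choosing the answer only at the end.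
import Mathlib
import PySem

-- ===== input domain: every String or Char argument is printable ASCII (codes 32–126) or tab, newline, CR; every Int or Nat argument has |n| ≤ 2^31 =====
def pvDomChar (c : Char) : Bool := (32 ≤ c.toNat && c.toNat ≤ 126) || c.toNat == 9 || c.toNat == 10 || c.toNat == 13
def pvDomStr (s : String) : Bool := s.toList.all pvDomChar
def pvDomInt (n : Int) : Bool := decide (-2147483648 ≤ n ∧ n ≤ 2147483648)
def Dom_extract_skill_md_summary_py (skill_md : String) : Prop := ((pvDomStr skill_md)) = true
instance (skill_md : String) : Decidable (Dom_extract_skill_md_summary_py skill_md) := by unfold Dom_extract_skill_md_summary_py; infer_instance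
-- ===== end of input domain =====

-- B replaces A's staged passes (build a frontmatter dict, read it, rescan for the first
-- body line) with one single pass over the enumerated lines driving a small state machine.

-- ===== PORT A =====
-- `line.split(":", 1)[0].strip().lower()` (the key of a frontmatter line; literally the
-- same Python subexpression in both A and B, so both ports use this helper)
def pvKey (l : String) : String :=
  PySem.Str.lower (PySem.Str.strip (((PySem.Str.splitMax? l ":" 1).getD []).getD 0 ""))

-- `line.split(":", 1)[1].strip().strip('"').strip("'")` (same in A and B)
def pvVal (l : String) : String :=
  PySem.Str.stripChars (PySem.Str.stripChars
    (PySem.Str.strip (((PySem.Str.splitMax? l ":" 1).getD []).getD 1 "")) "\"") "'"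

-- the frontmatter loop of _extract_skill_md_meta (`for line in lines[1:]`, break at "---")
def pvMetaLoop (ls : List String) (out : PySem.Dict String String) : PySem.Dict String String :=
  match ls with
  | [] => out
  | l :: rest =>
    if PySem.Str.strip l = "---" then out
    else if PySem.Str.isIn ":" l then
      if pvKey l = "name" ∨ pvKey l = "description" ∨ pvKey l = "version" then
        pvMetaLoop rest (out.insert (pvKey l) (pvVal l))
      else pvMetaLoop rest out
    else pvMetaLoop rest out

def pvExtractMeta (skill_md : String) : PySem.Dict String String :=
  if skill_md = "" then PySem.Dict.empty          -- `if not skill_md: return out`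
  else if ¬ (PySem.Str.splitlines skill_md ≠ [] ∧
      PySem.Str.strip ((PySem.Str.splitlines skill_md).headD "") = "---") then
    PySem.Dict.empty                              -- `if not (lines and lines[0].strip() == "---")`
  else pvMetaLoop (PySem.List.slice (PySem.Str.splitlines skill_md) (some 1) none) PySem.Dict.empty

-- A's fallback loop: first stripped line that is nonempty, no leading '#', not "---"
def pvFirstBody (ls : List String) : String :=
  match ls with
  | [] => ""
  | l :: rest =>
    if (PySem.Str.strip l != "") && !PySem.Str.startswith (PySem.Str.strip l) "#" &&
        (PySem.Str.strip l != "---") then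
      PySem.Str.slice (PySem.Str.strip l) none (some 200)
    else pvFirstBody rest

def extract_skill_md_summary_py (skill_md : String) : String :=
  match PySem.Dict.get? (pvExtractMeta skill_md) "description" with
  | some d => if d != "" then PySem.Str.slice d none (some 200)
              else pvFirstBody (PySem.Str.splitlines skill_md)
  | none => pvFirstBody (PySem.Str.splitlines skill_md)

-- ===== PORT B =====
-- one iteration of B's `for i, line in enumerate(...)` loop over state (in_fm, desc, body)
def pvStepB (st : Bool × Option String × Option String) (il : Int × String) :
    Bool × Option String × Option String :=
  let s := PySem.Str.strip il.2
  let st1 :=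
    if il.1 == 0 then ((s == "---"), st.2.1, st.2.2)
    else if st.1 then
      if s == "---" then (false, st.2.1, st.2.2)
      else if PySem.Str.isIn ":" il.2 then
        if pvKey il.2 == "description" then (st.1, some (pvVal il.2), st.2.2)
        else st
      else st
    else st
  if st1.2.2 == none && (s != "") && !PySem.Str.startswith s "#" && (s != "---") then
    (st1.1, st1.2.1, some s)
  else st1

def extract_skill_md_summary_py_alt (skill_md : String) : String :=
  let st := (PySem.List.enumerate (PySem.Str.splitlines skill_md) 0).foldl pvStepB
              (false, none, none)
  if (st.2.1.getD "") != "" then PySem.Str.slice (st.2.1.getD "") none (some 200)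
  else PySem.Str.slice (st.2.2.getD "") none (some 200)

-- ===== PRECONDITION & SPEC =====
def Spec_extract_skill_md_summary_py (skill_md : String) (out : String) : Prop := out = extract_skill_md_summary_py_alt skill_md
instance (skill_md : String) (out : String) : Decidable (Spec_extract_skill_md_summary_py skill_md out) := by unfold Spec_extract_skill_md_summary_py; infer_instance

-- ===== CLAIM =====
def Claim_equal_extract_skill_md_summary_py : Prop := ∀ (skill_md : String), Dom_extract_skill_md_summary_py skill_md → Spec_extract_skill_md_summary_py skill_md (extract_skill_md_summary_py skill_md)

-- ===== LEMMAS AND PROOFS =====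

-- componentwise form of B's step at an index ≠ 0 (the `elif` part of the loop body)
def pvFmNext (fm : Bool) (l : String) : Bool := fm && (PySem.Str.strip l != "---")

def pvDescNext (fm : Bool) (d : Option String) (l : String) : Option String :=
  if fm && (PySem.Str.strip l != "---") && PySem.Str.isIn ":" l &&
      (pvKey l == "description") then some (pvVal l) else d

def pvGood (l : String) : Bool :=
  (PySem.Str.strip l != "") && !PySem.Str.startswith (PySem.Str.strip l) "#" &&
    (PySem.Str.strip l != "---")

def pvStep1 (st : Bool × Option String × Option String) (l : String) :
    Bool × Option String × Option String :=
  (pvFmNext st.1 l, pvDescNext st.1 st.2.1 l,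
    if st.2.2 == none && pvGood l then some (PySem.Str.strip l) else st.2.2)

lemma stepB_eq_step1 (st : Bool × Option String × Option String) (l : String) (i : Int)
    (hi : (i == 0) = false) : pvStepB st (i, l) = pvStep1 st l := by
  obtain ⟨fm, d, b⟩ := st
  simp only [pvStepB, pvStep1, pvFmNext, pvDescNext, pvGood, hi, Bool.false_eq_true, if_false]
  cases fm with
  | false =>
    simp [Bool.and_assoc] <;> split_ifs <;> rfl

  | true =>
    by_cases hdash : PySem.Str.strip l = "---"
    · simp [hdash]
    · by_cases hc : PySem.Str.isIn ":" l = true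
      · have hc' : PySem.Chars.isIn [':'] l.toList = true := by simpa using hc
        by_cases hk : (pvKey l == "description") = true <;>
          simp [hdash, hc', hk, Bool.and_assoc, bne] <;> split_ifs <;> simp [hdash]
      · have hcb : PySem.Str.isIn ":" l = false := by
          cases h2 : PySem.Str.isIn ":" l
          · rfl
          · exact absurd h2 hc
        have hc' : PySem.Chars.isIn [':'] l.toList = false := by simpa using hcb
        simp [hdash, hc', Bool.and_assoc, bne] <;> split_ifs <;> simp [hdash]

lemma enumerate_foldl_stepB (ls : List String) (k : Int) (hk : 0 < k)
    (st : Bool × Option String × Option String) :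
    (PySem.List.enumerate ls k).foldl pvStepB st = ls.foldl pvStep1 st := by
  induction ls generalizing k st with
  | nil => simp [PySem.List.enumerate_nil]
  | cons l rest ih =>
    rw [PySem.List.enumerate_cons, List.foldl_cons, List.foldl_cons, ih (k + 1) (by omega),
      stepB_eq_step1 st l k (by simp; omega)]

-- forward spec of the description accumulator (last "description:" before the closing "---")
def descLoop (ls : List String) (d : Option String) : Option String :=
  match ls with
  | [] => d
  | l :: rest =>
    if PySem.Str.strip l = "---" then d
    else descLoop rest
      (if PySem.Str.isIn ":" l && (pvKey l == "description") then some (pvVal l) else d)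

-- forward spec of the first-body accumulator
def bodyLoop (ls : List String) (b : Option String) : Option String :=
  match ls with
  | [] => b
  | l :: rest => bodyLoop rest (if b == none && pvGood l then some (PySem.Str.strip l) else b)

lemma foldl_step1_body (ls : List String) (fm : Bool) (d b : Option String) :
    (ls.foldl pvStep1 (fm, d, b)).2.2 = bodyLoop ls b := by
  induction ls generalizing fm d b with
  | nil => rfl
  | cons l rest ih => rw [List.foldl_cons, pvStep1, ih, bodyLoop]

lemma foldl_step1_false (ls : List String) (d b : Option String) :
    (ls.foldl pvStep1 (false, d, b)).2.1 = d := by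
  induction ls generalizing b with
  | nil => rfl
  | cons l rest ih =>
    rw [List.foldl_cons]
    have h1 : pvFmNext false l = false := rfl
    have h2 : pvDescNext false d l = d := by simp [pvDescNext]
    rw [pvStep1, h1, h2, ih]

lemma foldl_step1_true (ls : List String) (d b : Option String) :
    (ls.foldl pvStep1 (true, d, b)).2.1 = descLoop ls d := by
  induction ls generalizing d b with
  | nil => rfl
  | cons l rest ih =>
    rw [List.foldl_cons, pvStep1, descLoop]
    by_cases hdash : PySem.Str.strip l = "---"
    · have h1 : pvFmNext true l = false := by simp [pvFmNext, hdash]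
      have h2 : pvDescNext true d l = d := by simp [pvDescNext, hdash]
      rw [h1, h2, if_pos hdash, foldl_step1_false]
    · have h1 : pvFmNext true l = true := by simp [pvFmNext, hdash]
      have h2 : pvDescNext true d l =
          (if PySem.Str.isIn ":" l && (pvKey l == "description") then some (pvVal l)
            else d) := by
        simp [pvDescNext, hdash, Bool.and_assoc]
      rw [h1, h2, if_neg hdash, ih]

-- A's dict, projected at "description", is the forward description accumulator
lemma metaLoop_get_desc (ls : List String) (out : PySem.Dict String String) :
    (pvMetaLoop ls out).get? "description" = descLoop ls (out.get? "description") := by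
  induction ls generalizing out with
  | nil => rfl
  | cons l rest ih =>
    rw [pvMetaLoop, descLoop]
    by_cases hdash : PySem.Str.strip l = "---"
    · rw [if_pos hdash, if_pos hdash]
    · rw [if_neg hdash, if_neg hdash]
      by_cases hc : PySem.Str.isIn ":" l = true
      · have hc' : PySem.Chars.isIn [':'] l.toList = true := by simpa using hc
        rw [if_pos hc]
        by_cases hk : pvKey l = "description"
        · rw [if_pos (Or.inr (Or.inl hk)), ih, hk, PySem.Dict.get?_insert_self,
            if_pos (show (PySem.Str.isIn ":" l &&
              (("description" : String) == "description")) = true by simp [hc'])]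
        · have hcond : (PySem.Str.isIn ":" l && (pvKey l == "description")) = false := by
            simp [hk]
          rw [hcond]
          by_cases htr : pvKey l = "name" ∨ pvKey l = "description" ∨ pvKey l = "version"
          · rw [if_pos htr, ih,
              PySem.Dict.get?_insert_of_ne out (pvVal l) (fun h => hk h.symm)]
            simp
          · rw [if_neg htr, ih]
            simp
      · have hcb : PySem.Str.isIn ":" l = false := by
          cases h2 : PySem.Str.isIn ":" l
          · rfl
          · exact absurd h2 hc
        have hc2 : PySem.Chars.isIn [':'] l.toList = false := by simpa using hcb
        have hcond : (PySem.Str.isIn ":" l && (pvKey l == "description")) = false := by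
          simp [hc2]
        rw [hcond, hcb]
        simp only [Bool.false_eq_true, if_false]
        rw [ih]
    
lemma bodyLoop_some (ls : List String) (x : String) :
    bodyLoop ls (some x) = some x := by
  induction ls with
  | nil => rfl
  | cons l rest ih =>
    rw [bodyLoop, show ((some x == (none : Option String)) && pvGood l) = false from rfl,
      if_neg (by simp), ih]

-- A's fallback loop equals the forward first-body accumulator (truncated at return)
lemma firstBody_bodyLoop (ls : List String) :
    pvFirstBody ls = PySem.Str.slice ((bodyLoop ls none).getD "") none (some 200) := by
  induction ls with
  | nil =>
    show "" = PySem.Str.slice "" none (some 200)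
    decide
  | cons l rest ih =>
    rw [pvFirstBody, bodyLoop]
    by_cases h : pvGood l = true
    · have hg : (PySem.Str.strip l != "" && !PySem.Str.startswith (PySem.Str.strip l) "#" &&
          PySem.Str.strip l != "---") = true := h
      rw [if_pos hg,
        if_pos (show ((none : Option String) == none && pvGood l) = true by simp [h]),
        bodyLoop_some]
      rfl
    · have hg : ¬ ((PySem.Str.strip l != "" && !PySem.Str.startswith (PySem.Str.strip l) "#" &&
          PySem.Str.strip l != "---") = true) := h
      rw [if_neg hg,
        if_neg (show ¬ (((none : Option String) == none && pvGood l) = true) by simp [h]),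
        ih]

lemma firstBody_start (l : String) (rest : List String) :
    pvFirstBody (l :: rest) =
      PySem.Str.slice ((bodyLoop rest (if pvGood l then some (PySem.Str.strip l)
        else none)).getD "") none (some 200) := by
  by_cases h : pvGood l = true
  · have hg : (PySem.Str.strip l != "" && !PySem.Str.startswith (PySem.Str.strip l) "#" &&
        PySem.Str.strip l != "---") = true := h
    rw [pvFirstBody, if_pos hg, if_pos h, bodyLoop_some]
    rfl
  · have hg : ¬ ((PySem.Str.strip l != "" && !PySem.Str.startswith (PySem.Str.strip l) "#" &&
        PySem.Str.strip l != "---") = true) := h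
    rw [pvFirstBody, if_neg hg, if_neg h, firstBody_bodyLoop]

-- B's step at index 0 (only sets the frontmatter flag, then the body check)
lemma stepB_zero (first : String) :
    pvStepB (false, none, none) (0, first) =
      ((PySem.Str.strip first == "---"), none,
        if pvGood first then some (PySem.Str.strip first) else none) := by
  simp only [pvStepB, pvGood, show ((0 : Int) == 0) = true from rfl]
  split_ifs with h1 h2 <;> simp_all [Bool.and_assoc]

-- ===== VERDICT =====
theorem extract_skill_md_summary_py_spec : Claim_equal_extract_skill_md_summary_py := by
  intro skill_md _
  unfold Spec_extract_skill_md_summary_py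
  by_cases hE : skill_md = ""
  · subst hE; decide
  · simp only [extract_skill_md_summary_py, extract_skill_md_summary_py_alt, pvExtractMeta,
      if_neg hE]
    cases hls : PySem.Str.splitlines skill_md with
    | nil =>
      rw [if_pos (by simp), PySem.List.enumerate_nil]
      show pvFirstBody [] = _
      rw [firstBody_bodyLoop]
      rfl
    | cons first rest =>
      rw [PySem.List.enumerate_cons, List.foldl_cons, stepB_zero,
        enumerate_foldl_stepB rest (0 + 1) (by omega)]
      by_cases hfm : PySem.Str.strip first = "---"
      · rw [if_neg (by simp [hfm]), PySem.List.slice_from_one, List.tail_cons,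
          metaLoop_get_desc rest PySem.Dict.empty, PySem.Dict.get?_empty]
        have hg : pvGood first = false := by simp [pvGood, hfm]
        have hfmb : (PySem.Str.strip first == "---") = true := by simpa using hfm
        rw [hfmb, hg]
        simp only [Bool.false_eq_true, if_false]
        rw [foldl_step1_true rest none none, foldl_step1_body rest true none none]
        cases hdl : descLoop rest none with
        | none =>
          show pvFirstBody (first :: rest) = _
          rw [firstBody_start, hg]
          simp
        | some d =>
          by_cases hdn : d = ""
          · subst hdn
            show pvFirstBody (first :: rest) = _
            rw [firstBody_start, hg]
            simp
          · simp [hdn]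
      · rw [if_pos (by simp [hfm])]
        have hfmb : (PySem.Str.strip first == "---") = false := by simpa using hfm
        rw [hfmb, foldl_step1_false, foldl_step1_body, PySem.Dict.get?_empty]
        show pvFirstBody (first :: rest) = _
        rw [firstBody_start]
        simp
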